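-- pv_equiv track=rewrite | github.com/dom96/DynreckIRC | IRC.py | gen_eol
-- ===== SOURCE A (Python) =====
-- def gen_eol(text, aft_colon=""):
--     word_eol = []
--     split = text.split()
--
--     if aft_colon != "":
--         split.append(aft_colon)
--
--     split.reverse()
--     for i in range(len(split)):
--         value = split[:len(split) - i]
--         value.reverse()
--         word_eol.append(" ".join(value))
--     return word_eol
-- ===== SOURCE B (Python) =====
-- def gen_eol(text, aft_colon=""):
--     words = text.split()
--     if aft_colon != "":
--         words.append(aft_colon)
--     n = len(words)
--     result = [""] * n
--     acc = ""
--     for i in range(n - 1, -1, -1):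
--         acc = words[i] if i == n - 1 else words[i] + " " + acc
--         result[i] = acc
--     return result
-- ===== Notes on version B (the rewrite author's own statement) =====
-- stated objective: alternative
-- what changed: Instead of slicing the reversed word list, re-reversing and re-joining it for every index, B walks the word list once from the last index down, growing one suffix-join accumulator string and storing it into a preallocated result slot.
import Mathlib
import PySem

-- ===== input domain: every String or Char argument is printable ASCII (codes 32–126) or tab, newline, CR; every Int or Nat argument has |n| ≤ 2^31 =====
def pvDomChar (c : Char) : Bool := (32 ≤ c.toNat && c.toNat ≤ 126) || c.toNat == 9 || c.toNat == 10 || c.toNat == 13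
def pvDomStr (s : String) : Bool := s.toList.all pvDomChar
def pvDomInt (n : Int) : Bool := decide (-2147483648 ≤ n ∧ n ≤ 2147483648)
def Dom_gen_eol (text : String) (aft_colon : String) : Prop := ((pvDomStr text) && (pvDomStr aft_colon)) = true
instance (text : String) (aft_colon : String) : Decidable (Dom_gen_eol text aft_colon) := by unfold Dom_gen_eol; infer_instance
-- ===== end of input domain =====

-- B replaces A's per-index slice/reverse/join with one backward pass growing a suffix-join accumulator (alternative single-pass strategy).

-- ===== PORT A =====
def gen_eol (text : String) (aft_colon : String) : List String :=
  let split := PySem.Str.split₀ text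
  let split := if aft_colon ≠ "" then split ++ [aft_colon] else split
  let split := split.reverse
  (PySem.List.pyRange 0 (split.length : Int) 1).foldl
    (fun word_eol i =>
      let value := PySem.List.slice split none (some ((split.length : Int) - i))
      let value := value.reverse
      word_eol ++ [PySem.Str.join " " value])
    []

-- ===== PORT B =====
-- backward loop of Source B: from the last index down, acc is the join of the suffix so far,
-- each step prepends words[i] (acc = words[i] at the last index) and records acc.
def pvSuffixScan : List String → String × List String
  | [] => ("", [])
  | [w] => (w, [w])
  | w :: x :: ws =>
    let p := pvSuffixScan (x :: ws)
    let acc := w ++ " " ++ p.1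
    (acc, acc :: p.2)

def gen_eol_alt (text : String) (aft_colon : String) : List String :=
  let words := PySem.Str.split₀ text
  let words := if aft_colon ≠ "" then words ++ [aft_colon] else words
  (pvSuffixScan words).2

-- ===== PRECONDITION & SPEC =====
def Spec_gen_eol (text : String) (aft_colon : String) (out : List String) : Prop := out = gen_eol_alt text aft_colon
instance (text : String) (aft_colon : String) (out : List String) : Decidable (Spec_gen_eol text aft_colon out) := by unfold Spec_gen_eol; infer_instance

-- ===== CLAIM (what is proved, stated in full; the proofs are below) =====
def Claim_equal_gen_eol : Prop := ∀ (text : String) (aft_colon : String), Dom_gen_eol text aft_colon → Spec_gen_eol text aft_colon (gen_eol text aft_colon)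

-- ===== LEMMAS AND PROOFS =====

-- the accumulator of the backward pass is the " "-join of the remaining words
theorem pvSuffixScan_fst (ws : List String) :
    (pvSuffixScan ws).1.toList = PySem.Chars.join [' '] (ws.map String.toList) := by
  induction ws with
  | nil => simp [pvSuffixScan, PySem.Chars.join, List.intercalate]
  | cons w ws ih =>
    cases ws with
    | nil => simp [pvSuffixScan, PySem.Chars.join, List.intercalate]
    | cons x ws =>
      simp only [pvSuffixScan, List.map_cons, PySem.Chars.join_cons_cons]
      simp only [List.map_cons] at ih
      simp [ih]

theorem pvSuffixScan_fst' (ws : List String) :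
    (pvSuffixScan ws).1 = PySem.Str.join " " ws := by
  apply String.toList_injective
  rw [pvSuffixScan_fst, PySem.Str.toList_join]
  rfl

theorem pvMapRangeSuffix (w : String) (ws : List String) :
    (List.range (w :: ws).length).map (fun k => PySem.Str.join " " ((w :: ws).drop k)) =
      PySem.Str.join " " (w :: ws) :: (List.range ws.length).map (fun k => PySem.Str.join " " (ws.drop k)) := by
  rw [List.length_cons, List.range_succ_eq_map, List.map_cons, List.map_map]
  simp [Function.comp]

-- the recorded list is exactly the suffix-joins, index by index
theorem pvSuffixScan_snd (ws : List String) :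
    (pvSuffixScan ws).2 = (List.range ws.length).map (fun k => PySem.Str.join " " (ws.drop k)) := by
  induction ws with
  | nil => simp [pvSuffixScan]
  | cons w ws ih =>
    cases ws with
    | nil =>
      simp [pvSuffixScan, List.range_succ]
      apply String.toList_injective
      rw [PySem.Str.toList_join]
      simp [PySem.Chars.join, List.intercalate]
    | cons x ws =>
      have hfst : (pvSuffixScan (x :: ws)).1 = PySem.Str.join " " (x :: ws) :=
        pvSuffixScan_fst' (x :: ws)
      have hhead : w ++ " " ++ PySem.Str.join " " (x :: ws) = PySem.Str.join " " (w :: x :: ws) := by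
        apply String.toList_injective
        simp [PySem.Str.toList_join, PySem.Chars.join_cons_cons]
      simp only [pvSuffixScan, hfst, hhead, ih]
      rw [pvMapRangeSuffix w (x :: ws), pvMapRangeSuffix x ws]

-- A's value at index k is the join of the k-th suffix
theorem gen_eol_eq_map (text : String) (aft_colon : String) :
    gen_eol text aft_colon =
      (List.range ((if aft_colon ≠ "" then PySem.Str.split₀ text ++ [aft_colon] else PySem.Str.split₀ text)).length).map
        (fun k => PySem.Str.join " "
          (((if aft_colon ≠ "" then PySem.Str.split₀ text ++ [aft_colon] else PySem.Str.split₀ text)).drop k)) := by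
  set ws := (if aft_colon ≠ "" then PySem.Str.split₀ text ++ [aft_colon] else PySem.Str.split₀ text) with hws
  simp only [gen_eol]
  rw [← hws]
  simp only [PySem.List.foldl_append_singleton_eq_map, List.nil_append, List.length_reverse]
  rw [PySem.List.pyRange_one, List.map_map]
  simp only [Int.sub_zero, Int.toNat_natCast]
  apply List.map_congr_left
  intro k hk
  rw [List.mem_range] at hk
  simp only [Function.comp_apply, Int.zero_add]
  have hcast : (ws.length : Int) - (k : Int) = ((ws.length - k : Nat) : Int) := by omega
  rw [hcast, PySem.List.slice_to_natCast, List.take_reverse]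
  have : ws.length - (ws.length - k) = k := by omega
  rw [this, List.reverse_reverse]

-- ===== VERDICT (by name: the statement is the Claim_ definition above) =====
theorem gen_eol_spec : Claim_equal_gen_eol := by
  intro text aft_colon _
  unfold Spec_gen_eol gen_eol_alt
  rw [gen_eol_eq_map, pvSuffixScan_snd]
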